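-- pv_equiv track=rewrite | github.com/jamester234/Advent-of-Code-2016 | Days/Day 11 - Radioisotope Thermoelectric Generators/Part 2.py | position_encode
-- ===== SOURCE A (Python) =====
-- def position_encode(elevator_position_int, floors_list):
--     output_list = [elevator_position_int]
--     for floor_single in floors_list:
--         pairs = 0
--         floor_test = [floor_single[i] > 0 for i in range(len(floor_single))]
--         for component in floor_single:
--             if -component in floor_single:
--                 pairs += 1
--         output_list.extend([floor_test.count(False), floor_test.count(True), int(pairs/2)])
--     return(output_list)
-- ===== SOURCE B (Python) =====
-- def position_encode(elevator_position_int, floors_list):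
--     output_list = [elevator_position_int]
--     for floor in floors_list:
--         s = sorted(floor)
--         neg = sorted(-v for v in floor)
--         chips = 0
--         while chips < len(s) and s[chips] <= 0:
--             chips += 1
--         gens = len(s) - chips
--         i = j = cnt = 0
--         while i < len(s) and j < len(neg):
--             if s[i] < neg[j]:
--                 i += 1
--             elif s[i] > neg[j]:
--                 j += 1
--             else:
--                 cnt += 1
--                 i += 1
--         output_list.extend([chips, gens, cnt // 2])
--     return output_list
-- ===== Notes on version B (the rewrite author's own statement) =====
-- stated objective: faster
-- what changed: Per floor B sorts the components and the negated components, counts chips as the length of the non-positive prefix of the sorted list, and counts pair-forming components with a two-pointer merge over the two sorted lists, replacing A's boolean-list counting and O(n^2) membership scan.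
import Mathlib
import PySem

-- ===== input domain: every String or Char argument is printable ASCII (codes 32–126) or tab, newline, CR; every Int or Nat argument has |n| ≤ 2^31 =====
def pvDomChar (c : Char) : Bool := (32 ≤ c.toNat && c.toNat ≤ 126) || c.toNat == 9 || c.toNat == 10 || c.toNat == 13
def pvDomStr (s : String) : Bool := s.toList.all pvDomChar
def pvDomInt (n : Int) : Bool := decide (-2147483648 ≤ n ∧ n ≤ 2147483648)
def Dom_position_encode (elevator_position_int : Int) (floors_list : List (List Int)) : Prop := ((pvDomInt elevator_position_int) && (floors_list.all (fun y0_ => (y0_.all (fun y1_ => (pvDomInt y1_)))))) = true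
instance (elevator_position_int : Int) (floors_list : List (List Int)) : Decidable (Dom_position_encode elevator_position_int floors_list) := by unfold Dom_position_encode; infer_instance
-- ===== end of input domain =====

-- B sorts each floor and its negations, counts chips as the non-positive prefix and pair members by a two-pointer merge (sort + merge instead of A's quadratic membership scan); equal return value proved.

-- ===== PORT A =====
-- [floor_single[i] > 0 for i in range(len(floor_single))] indexes every position in order = element-wise map (exact)
-- int(pairs/2) with pairs ≥ 0 is floor division (exact here)
def position_encode (elevator_position_int : Int) (floors_list : List (List Int)) : List Int :=
  floors_list.foldl
    (fun output_list floor_single =>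
      let floor_test : List Bool := floor_single.map (fun x => decide (x > 0))
      let pairs : Int := floor_single.foldl
        (fun pairs component => if floor_single.contains (-component) then pairs + 1 else pairs) 0
      output_list ++ [(floor_test.count false : Int), (floor_test.count true : Int), PySem.Int.floordiv pairs 2])
    [elevator_position_int]

-- ===== PORT B =====
-- the 'while chips < len(s) and s[chips] <= 0' counting loop of Source B
def pvChipsPrefix : List Int → Int
  | [] => 0
  | x :: xs => if x ≤ 0 then 1 + pvChipsPrefix xs else 0

-- the two-pointer 'while i < len(s) and j < len(neg)' loop of Source B (pointers as list suffixes)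
def pvTwoPointer : List Int → List Int → Int
  | [], _ => 0
  | _ :: _, [] => 0
  | x :: xs, y :: ys =>
    if x < y then pvTwoPointer xs (y :: ys)
    else if x > y then pvTwoPointer (x :: xs) ys
    else 1 + pvTwoPointer xs (y :: ys)
termination_by s t => s.length + t.length

def position_encode_alt (elevator_position_int : Int) (floors_list : List (List Int)) : List Int :=
  floors_list.foldl
    (fun output_list floor =>
      let s := PySem.List.sorted floor (fun x => x) false
      let neg := PySem.List.sorted (floor.map (fun v => -v)) (fun x => x) false
      let chips := pvChipsPrefix s
      let gens := (s.length : Int) - chips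
      let cnt := pvTwoPointer s neg
      output_list ++ [chips, gens, PySem.Int.floordiv cnt 2])
    [elevator_position_int]

-- ===== PRECONDITION & SPEC =====
def Spec_position_encode (elevator_position_int : Int) (floors_list : List (List Int)) (out : List Int) : Prop := out = position_encode_alt elevator_position_int floors_list
instance (elevator_position_int : Int) (floors_list : List (List Int)) (out : List Int) : Decidable (Spec_position_encode elevator_position_int floors_list out) := by unfold Spec_position_encode; infer_instance

-- ===== CLAIM (what is proved, stated in full; the proofs are below) =====
def Claim_equal_position_encode : Prop := ∀ (elevator_position_int : Int) (floors_list : List (List Int)), Dom_position_encode elevator_position_int floors_list → Spec_position_encode elevator_position_int floors_list (position_encode elevator_position_int floors_list)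

-- ===== LEMMAS AND PROOFS =====

-- on a nondecreasing list the prefix counter counts ALL non-positive elements
theorem chipsPrefix_eq_countP (l : List Int) (h : l.Pairwise (· ≤ ·)) :
    pvChipsPrefix l = (l.countP (fun x => decide (x ≤ 0)) : Int) := by
  induction l with
  | nil => rfl
  | cons x xs ih =>
    rcases List.pairwise_cons.mp h with ⟨hx, hxs⟩
    by_cases hx0 : x ≤ 0
    · simp [pvChipsPrefix, hx0, ih hxs]; ring
    · have : xs.countP (fun x => decide (x ≤ 0)) = 0 := by
        rw [List.countP_eq_zero]
        intro y hy
        simp only [decide_eq_true_eq]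
        have := hx y hy; omega
      simp [pvChipsPrefix, hx0, this]

-- the two-pointer merge over two nondecreasing lists counts the elements of s that occur in t
theorem twoPointer_eq_countP (s t : List Int) (hs : s.Pairwise (· ≤ ·)) (ht : t.Pairwise (· ≤ ·)) :
    pvTwoPointer s t = (s.countP (fun x => decide (x ∈ t)) : Int) := by
  induction s, t using pvTwoPointer.induct with
  | case1 t => simp [pvTwoPointer]
  | case2 x xs => simp [pvTwoPointer]
  | case3 x xs y ys hlt ih =>
    -- x < y: x ∉ y::ys since all elements ≥ y
    rcases List.pairwise_cons.mp hs with ⟨hx, hxs⟩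
    have hnot : x ∉ y :: ys := by
      intro hm
      rcases List.mem_cons.mp hm with rfl | hm
      · omega
      · have := (List.pairwise_cons.mp ht).1 x hm; omega
    rw [pvTwoPointer]
    simp only [hlt, if_pos]
    rw [ih hxs ht, List.countP_cons]
    simp [hnot]
  | case4 x xs y ys hlt hgt ih =>
    -- x > y: y < all of x::xs, so membership in y::ys equals membership in ys for all of x::xs
    rcases List.pairwise_cons.mp hs with ⟨hx, hxs⟩
    rw [pvTwoPointer]
    simp only [hlt, hgt, if_pos, if_false]
    rw [ih hs (List.pairwise_cons.mp ht).2]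
    simp only [Int.natCast_inj]
    apply List.countP_congr
    intro z hz
    have hzy : y < z := by
      rcases List.mem_cons.mp hz with rfl | hm
      · omega
      · have := hx z hm; omega
    simp only [decide_eq_true_eq, List.mem_cons]
    constructor
    · intro h; exact Or.inr h
    · rintro (rfl | h)
      · omega
      · exact h
  | case5 x xs y ys hlt hgt ih =>
    have hxy : x = y := by omega
    rcases List.pairwise_cons.mp hs with ⟨hx, hxs⟩
    rw [pvTwoPointer]
    simp only [hlt, hgt]
    rw [ih hxs ht, List.countP_cons]
    subst hxy
    simp [List.mem_cons]
    ring

-- A's pairs fold is a countP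
theorem pairsA_eq_countP (floor : List Int) :
    floor.foldl (fun pairs component => if floor.contains (-component) then pairs + 1 else pairs) 0
      = (floor.countP (fun v => floor.contains (-v)) : Int) := by
  rw [PySem.List.foldl_if_add_one]; ring

-- every element is counted on exactly one side of the chips/generators split
theorem countP_le_add_countP_gt (l : List Int) :
    l.countP (fun x => decide (x ≤ 0)) + l.countP (fun x => decide (x > 0)) = l.length := by
  induction l with
  | nil => rfl
  | cons a t ih =>
    by_cases h : a ≤ 0
    · have h2 : decide (a > 0) = false := by simp only [decide_eq_false_iff_not]; omega
      simp [h, h2] at ih ⊢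
      omega
    · have h2 : decide (a > 0) = true := by simp only [decide_eq_true_eq]; omega
      have h3 : decide (a ≤ 0) = false := by simp only [decide_eq_false_iff_not]; omega
      simp [h2, h3] at ih ⊢
      omega

-- per-floor: B's triple equals A's triple
theorem floor_triple_eq (floor : List Int) :
    (let s := PySem.List.sorted floor (fun x => x) false
     let neg := PySem.List.sorted (floor.map (fun v => -v)) (fun x => x) false
     let chips := pvChipsPrefix s
     let gens := (s.length : Int) - chips
     let cnt := pvTwoPointer s neg
     [chips, gens, PySem.Int.floordiv cnt 2])
    = (let floor_test : List Bool := floor.map (fun x => decide (x > 0))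
       let pairs : Int := floor.foldl
         (fun pairs component => if floor.contains (-component) then pairs + 1 else pairs) 0
       [(floor_test.count false : Int), (floor_test.count true : Int), PySem.Int.floordiv pairs 2]) := by
  simp only
  set s := PySem.List.sorted floor (fun x => x) false with hsdef
  set neg := PySem.List.sorted (floor.map (fun v => -v)) (fun x => x) false with hnegdef
  have hps : s.Pairwise (· ≤ ·) := PySem.List.sorted_pairwise floor (fun x => x)
  have hpn : neg.Pairwise (· ≤ ·) := PySem.List.sorted_pairwise (floor.map (fun v => -v)) (fun x => x)
  have hperm : s.Perm floor := PySem.List.sorted_perm floor (fun x => x) false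
  have hlen : s.length = floor.length := hperm.length_eq
  -- chips
  have hchips : pvChipsPrefix s = (floor.countP (fun x => decide (x ≤ 0)) : Int) := by
    rw [chipsPrefix_eq_countP s hps, hperm.countP_eq]
  have hfalse : (floor.map (fun x => decide (x > 0))).count false
      = floor.countP (fun x => decide (x ≤ 0)) := by
    rw [List.count_eq_countP, List.countP_map]
    apply List.countP_congr
    intro z _
    by_cases h : z ≤ 0 <;> simp [Function.comp, h]
  have htrue : (floor.map (fun x => decide (x > 0))).count true
      = floor.countP (fun x => decide (x > 0)) := by
    rw [List.count_eq_countP, List.countP_map]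
    apply List.countP_congr
    intro z _
    simp [Function.comp]
  have hsplit := countP_le_add_countP_gt floor
  -- pairs
  have hcnt : pvTwoPointer s neg
      = (floor.countP (fun v => floor.contains (-v)) : Int) := by
    rw [twoPointer_eq_countP s neg hps hpn, hperm.countP_eq]
    congr 1
    apply List.countP_congr
    intro z _
    simp only [decide_eq_true_eq, hnegdef, PySem.List.mem_sorted, List.mem_map,
      List.contains_iff_mem]
    constructor
    · rintro ⟨w, hw, he⟩
      have : w = -z := by omega
      subst this; exact hw
    · intro h; exact ⟨-z, h, by ring⟩
  rw [hchips, hfalse, htrue, hcnt, pairsA_eq_countP, hlen]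
  have : ((floor.length : Int)) - (floor.countP (fun x => decide (x ≤ 0)) : Int)
      = (floor.countP (fun x => decide (x > 0)) : Int) := by omega
  rw [this]

theorem fold_eq (floors : List (List Int)) (acc : List Int) :
    floors.foldl
      (fun output_list floor =>
        let s := PySem.List.sorted floor (fun x => x) false
        let neg := PySem.List.sorted (floor.map (fun v => -v)) (fun x => x) false
        let chips := pvChipsPrefix s
        let gens := (s.length : Int) - chips
        let cnt := pvTwoPointer s neg
        output_list ++ [chips, gens, PySem.Int.floordiv cnt 2]) acc
    = floors.foldl
      (fun output_list floor_single =>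
        let floor_test : List Bool := floor_single.map (fun x => decide (x > 0))
        let pairs : Int := floor_single.foldl
          (fun pairs component => if floor_single.contains (-component) then pairs + 1 else pairs) 0
        output_list ++ [(floor_test.count false : Int), (floor_test.count true : Int), PySem.Int.floordiv pairs 2]) acc := by
  induction floors generalizing acc with
  | nil => rfl
  | cons f t ih =>
    simp only [List.foldl_cons]
    rw [floor_triple_eq f, ih]

-- ===== VERDICT (by name: the statement is the Claim_ definition above) =====
theorem position_encode_spec : Claim_equal_position_encode := by
  intro e fl _
  unfold Spec_position_encode position_encode position_encode_alt
  exact (fold_eq fl [e]).symm
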